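-- pv_equiv track=rewrite | github.com/cj8scrambler/AOC | 2018/7/one.py | find_available
-- ===== SOURCE A (Python) =====
-- def find_available(thegraph):
--     ''' Return an alphabeticly sorted list of available tasks (no depednecies) in the graph '''
--     possible = list(thegraph.keys())
--     for source in thegraph.keys():
--         for target in thegraph[source]:
--             if target in possible:
--                 possible.remove(target);
--     if (len(possible) == 0):
--         raise ValueError('Circular graph')
--
--     return sorted(possible)
-- ===== SOURCE B (Python) =====
-- def find_available(thegraph):
--     ''' Return an alphabeticly sorted list of available tasks (no depednecies) in the graph '''
--     incoming = set()
--     for targets in thegraph.values():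
--         incoming.update(targets)
--     possible = [n for n in thegraph if n not in incoming]
--     if not possible:
--         raise ValueError('Circular graph')
--     return sorted(possible)
-- ===== Notes on version B (the rewrite author's own statement) =====
-- stated objective: faster
-- what changed: A repeatedly scans and mutates a 'possible' list (membership test + list.remove inside the nested loop); B instead accumulates one set of all incoming-edge targets and then filters the keys in a single pass.
-- outside the precondition, e.g. on find_available({'a': ['b'], 'b': ['a']}): A raises ValueError, B raises ValueError
import Mathlib
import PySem

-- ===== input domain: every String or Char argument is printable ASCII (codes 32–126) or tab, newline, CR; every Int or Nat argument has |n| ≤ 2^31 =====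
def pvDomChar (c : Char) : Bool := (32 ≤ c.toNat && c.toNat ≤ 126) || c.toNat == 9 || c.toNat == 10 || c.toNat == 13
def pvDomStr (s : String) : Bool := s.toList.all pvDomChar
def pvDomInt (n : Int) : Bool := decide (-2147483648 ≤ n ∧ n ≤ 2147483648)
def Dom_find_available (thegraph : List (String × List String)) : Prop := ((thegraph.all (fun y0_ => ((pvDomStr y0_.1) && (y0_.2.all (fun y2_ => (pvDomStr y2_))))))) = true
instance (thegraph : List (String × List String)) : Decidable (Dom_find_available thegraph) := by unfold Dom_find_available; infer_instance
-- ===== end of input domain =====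

-- B replaces A's scan-and-remove (membership test + list.remove inside a nested loop) by one pass that
-- accumulates the set of all incoming-edge targets and a single filter over the keys; return value only
-- is compared (neither program mutates its argument).

-- ===== PORT A =====
-- possible = list(keys); for source in keys: for target in thegraph[source]:
--   if target in possible: possible.remove(target);  return sorted(possible)
def find_available (thegraph : List (String × List String)) : List String :=
  let possible :=
    thegraph.foldl
      (fun p kv =>
        ((thegraph.lookup kv.1).getD []).foldl
          (fun p t => if p.contains t then (PySem.List.remove? p t).getD p else p) p)
      (thegraph.map (·.1))
  -- on inputs where possible = [], Python raises ValueError('Circular graph'); Pre_ excludes them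
  PySem.List.sorted possible (fun x => x) false

-- ===== PORT B =====
def find_available_alt (thegraph : List (String × List String)) : List String :=
  let incoming : PySem.Set String :=
    thegraph.foldl (fun s kv => PySem.Set.update s kv.2) PySem.Set.empty
  let possible := (thegraph.map (·.1)).filter (fun n => !(PySem.Set.contains incoming n))
  -- on inputs where possible = [], Python raises ValueError('Circular graph'); Pre_ excludes them
  PySem.List.sorted possible (fun x => x) false

-- ===== PRECONDITION & SPEC =====
-- Pre_ excludes (a) circular graphs, on which both Pythons raise ValueError, and (b) association lists
-- with duplicate keys, which cannot arise from a Python dict argument.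
def Pre_find_available (thegraph : List (String × List String)) : Prop :=
  (thegraph.map (·.1)).Nodup ∧
  ∃ k ∈ thegraph.map (·.1), ∀ kv ∈ thegraph, k ∉ kv.2
instance (thegraph : List (String × List String)) : Decidable (Pre_find_available thegraph) := by
  unfold Pre_find_available; infer_instance

def pvWitness_find_available : (List (String × List String)) :=
  [("a", ["b"]), ("b", [])]

def Spec_find_available (thegraph : List (String × List String)) (out : List String) : Prop := out = find_available_alt thegraph
instance (thegraph : List (String × List String)) (out : List String) : Decidable (Spec_find_available thegraph out) := by unfold Spec_find_available; infer_instance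

-- ===== CLAIM (what is proved, stated in full; the proofs are below) =====
def Claim_equal_find_available : Prop := ∀ (thegraph : List (String × List String)), Dom_find_available thegraph → Pre_find_available thegraph → Spec_find_available thegraph (find_available thegraph)

-- ===== LEMMAS AND PROOFS =====

-- one inner loop of A: removing the targets ts from a duplicate-free list p filters them out
theorem pv_inner_fold (ts : List String) (p : List String) (hp : p.Nodup) :
    ts.foldl (fun p t => if p.contains t then (PySem.List.remove? p t).getD p else p) p
      = p.filter (fun x => !(ts.contains x)) := by
  induction ts generalizing p with
  | nil => simp
  | cons t ts ih =>
    have hstep : (if p.contains t then (PySem.List.remove? p t).getD p else p)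
        = p.filter (fun x => !(x == t)) := by
      by_cases h : t ∈ p
      · rw [if_pos (by simpa using h), PySem.List.remove?_eq_some_erase _ _ h]
        simpa using hp.erase_eq_filter t
      · rw [if_neg (by simpa using h)]
        refine (List.filter_eq_self.mpr ?_).symm
        intro x hx
        simp only [Bool.not_eq_eq_eq_not, Bool.not_true, beq_eq_false_iff_ne]
        exact fun hxt => h (hxt ▸ hx)
    rw [List.foldl_cons, hstep, ih _ (hp.filter _), List.filter_filter]
    apply List.filter_congr
    intro x _
    by_cases hxt : x = t <;> simp [hxt, Bool.and_comm]

-- A's outer loop, once each lookup is resolved, filters out everything in the flattened target lists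
theorem pv_outer_fold (g : List (String × List String)) (p : List String) (hp : p.Nodup) :
    g.foldl
        (fun p kv => kv.2.foldl
          (fun p t => if p.contains t then (PySem.List.remove? p t).getD p else p) p) p
      = p.filter (fun x => !((g.map (·.2)).flatten.contains x)) := by
  induction g generalizing p with
  | nil => simp
  | cons kv g ih =>
    rw [List.foldl_cons, pv_inner_fold _ _ hp, ih _ (hp.filter _), List.filter_filter]
    apply List.filter_congr
    intro x _
    by_cases h1 : x ∈ kv.2 <;> by_cases h2 : x ∈ (List.map (fun x => x.2) g).flatten <;>
      simp [h1, h2]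

-- with duplicate-free keys, A's lookup of each key returns that entry's value
theorem pv_lookup_self (g : List (String × List String)) (hk : (g.map (·.1)).Nodup)
    (kv : String × List String) (hkv : kv ∈ g) : g.lookup kv.1 = some kv.2 := by
  induction g with
  | nil => cases hkv
  | cons hd tl ih =>
    rcases List.mem_cons.mp hkv with h | h
    · subst h; simp [List.lookup]
    · have hne : hd.1 ≠ kv.1 := by
        intro he
        apply (List.nodup_cons.mp hk).1
        have hm : kv.1 ∈ List.map (fun x => x.1) tl := List.mem_map_of_mem h
        simpa [he] using hm
      simp only [List.lookup, beq_eq_false_iff_ne.mpr (fun he => hne he.symm)]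
      exact ih (List.nodup_cons.mp hk).2 h

-- membership in B's accumulated incoming-set is membership in the flattened target lists
theorem pv_incoming_mem (g : List (String × List String)) (s : PySem.Set String) (x : String) :
    x ∈ g.foldl (fun s kv => PySem.Set.update s kv.2) s ↔ x ∈ s ∨ x ∈ (g.map (·.2)).flatten := by
  induction g generalizing s with
  | nil => simp
  | cons kv g ih =>
    rw [List.foldl_cons, ih, PySem.Set.mem_update]
    simp only [List.map_cons, List.flatten_cons, List.mem_append]
    tauto

-- ===== VERDICT (by name: the statement is the Claim_ definition above) =====
theorem find_available_spec : Claim_equal_find_available := by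
  intro g _ hpre
  unfold Spec_find_available find_available find_available_alt
  obtain ⟨hk, -⟩ := hpre
  have hfold :
      g.foldl
          (fun p kv => ((g.lookup kv.1).getD []).foldl
            (fun p t => if p.contains t then (PySem.List.remove? p t).getD p else p) p)
          (g.map (·.1))
        = g.foldl
          (fun p kv => kv.2.foldl
            (fun p t => if p.contains t then (PySem.List.remove? p t).getD p else p) p)
          (g.map (·.1)) := by
    apply PySem.List.foldl_congr_mem
    intro p kv hkv
    rw [pv_lookup_self g hk kv hkv]
    rfl
  simp only [hfold, pv_outer_fold g _ hk]
  congr 1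
  apply List.filter_congr
  intro x _
  have := pv_incoming_mem g PySem.Set.empty x
  simp only [PySem.Set.empty] at this
  simp only [← List.contains_iff_mem] at this
  congr 1
  rcases Bool.eq_false_or_eq_true (PySem.Set.contains (g.foldl (fun s kv => PySem.Set.update s kv.2) PySem.Set.empty) x) with h | h <;>
    rcases Bool.eq_false_or_eq_true (List.contains ((g.map (·.2)).flatten) x) with h' | h' <;>
    simp_all [PySem.Set.contains]
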